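-- pv_equiv track=rewrite | github.com/ccolas/language_and_experience | src/agent/communicating/rules2string.py | format_transform
-- ===== SOURCE A (Python) =====
-- def format_name_list(a_list, colors, avatar_name, obj_name='objects', last='and'):
--     if avatar_name in a_list:
--         a_list.remove(avatar_name)
--         a_list = [avatar_name] + a_list
--
--     if a_list == [avatar_name]:
--         return "you"
--     else:
--         color_list = [colors[obj] for obj in a_list]
--         if len(color_list) > 1:
--             a_list_str = ", ".join(color_list[:-1]) + f' {last} ' + color_list[-1]
--         else:
--             a_list_str = color_list[0]
--     if obj_name != '':
--         return a_list_str + f' {obj_name}'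
--     else:
--         return a_list_str
--
-- def format_transform(transformed, colors, avatar_name):
--     killed = [tr[0] for tr in transformed]
--     results = [tr[1] for tr in transformed]
--
--     s = f"You can transform"
--     i = 0
--     for portal, exit in zip(killed, results):
--         portal_str = format_name_list([portal], colors, avatar_name, obj_name='objects')
--         exit_str = format_name_list([exit], colors, avatar_name, obj_name='objects')
--         if i == 0:
--             s += ' '
--         elif i == len(killed) - 1:
--             s += ' and '
--         else:
--             s += ', '
--         s += f"{portal_str} into {exit_str}"
--         i += 1
--     return s
-- ===== SOURCE B (Python) =====
-- def format_transform(transformed, colors, avatar_name):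
--     def name(x):
--         return "you" if x == avatar_name else f"{colors[x]} objects"
--
--     def go(pairs):
--         # pairs is non-empty; separator chosen by how many pairs remain
--         head = f"{name(pairs[0][0])} into {name(pairs[0][1])}"
--         if len(pairs) == 1:
--             return head
--         if len(pairs) == 2:
--             return head + " and " + go(pairs[1:])
--         return head + ", " + go(pairs[1:])
--
--     if not transformed:
--         return "You can transform"
--     return "You can transform " + go(transformed)
-- ===== Notes on version B (the rewrite author's own statement) =====
-- stated objective: alternative
-- what changed: Replaces A's imperative accumulator loop with a position counter i and branches on i==0/i==len-1 (plus the separate killed/results projections and the generalized format_name_list helper) by direct structural recursion on the pair list: each call emits its own fragment and picks ', ' or ' and ' from how many pairs remain, so no counter, length comparison or accumulator string exists.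
import Mathlib
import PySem

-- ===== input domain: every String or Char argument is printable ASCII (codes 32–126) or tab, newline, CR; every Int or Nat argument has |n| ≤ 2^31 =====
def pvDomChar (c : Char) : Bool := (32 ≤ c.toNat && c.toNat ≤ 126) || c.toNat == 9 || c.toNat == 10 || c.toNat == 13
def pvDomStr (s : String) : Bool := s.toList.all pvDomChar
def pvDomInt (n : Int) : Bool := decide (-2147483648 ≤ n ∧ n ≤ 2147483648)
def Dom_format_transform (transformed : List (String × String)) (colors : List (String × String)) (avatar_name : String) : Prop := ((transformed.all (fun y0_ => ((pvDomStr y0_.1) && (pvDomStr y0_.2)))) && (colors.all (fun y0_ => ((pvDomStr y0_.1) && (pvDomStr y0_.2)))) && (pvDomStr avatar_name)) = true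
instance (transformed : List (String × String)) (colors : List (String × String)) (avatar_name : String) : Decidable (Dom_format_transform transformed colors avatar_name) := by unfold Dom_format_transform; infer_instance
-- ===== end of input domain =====

-- B replaces A's counter-driven accumulator loop by direct structural recursion on the pair list
-- (separator picked from how many pairs remain); objective: alternative decomposition, same cost.

-- ===== PORT A =====
-- port of format_name_list (A's helper), step for step; colors[obj] is a dict lookup,
-- KeyError (= none) is excluded by Pre_ and defaulted to "" here (unreachable under Pre_)
def fnlA (a_list : List String) (colors : List (String × String)) (avatar_name : String) (obj_name : String) (last : String) : String :=
  let a_list := if a_list.contains avatar_name then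
      avatar_name :: ((PySem.List.remove? a_list avatar_name).getD a_list)
    else a_list
  if a_list == [avatar_name] then "you"
  else
    let color_list := a_list.map (fun obj => ((PySem.Dict.mk colors).get? obj).getD "")
    let a_list_str := if color_list.length > 1 then
        PySem.Str.join ", " (PySem.List.slice color_list none (some (-1))) ++ " " ++ last ++ " "
          ++ ((PySem.List.pyGet? color_list (-1)).getD "")
      else (PySem.List.pyGet? color_list 0).getD ""
    if obj_name != "" then a_list_str ++ " " ++ obj_name else a_list_str

-- the 'for portal, exit in zip(killed, results)' loop with its counter i and n = len(killed)
def ftLoopA (pairs : List (String × String)) (colors : List (String × String)) (avatar_name : String) (n : Nat) (i : Nat) (s : String) : String :=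
  match pairs with
  | [] => s
  | (portal, exit) :: rest =>
      let portal_str := fnlA [portal] colors avatar_name "objects" "and"
      let exit_str := fnlA [exit] colors avatar_name "objects" "and"
      let s := (if i = 0 then s ++ " " else if i = n - 1 then s ++ " and " else s ++ ", ")
                 ++ portal_str ++ " into " ++ exit_str
      ftLoopA rest colors avatar_name n (i + 1) s

def format_transform (transformed : List (String × String)) (colors : List (String × String)) (avatar_name : String) : String :=
  let killed := transformed.map (fun tr => tr.1)
  let results := transformed.map (fun tr => tr.2)
  ftLoopA (killed.zip results) colors avatar_name killed.length 0 "You can transform"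

-- ===== PORT B =====
-- name(x) from Source B (same "" default for the KeyError case, unreachable under Pre_)
def nameB (colors : List (String × String)) (avatar_name : String) (x : String) : String :=
  if x == avatar_name then "you" else ((PySem.Dict.mk colors).get? x).getD "" ++ " objects"

-- go(pairs) from Source B: structural recursion, separator chosen by the remaining length;
-- the [] case is unreachable in Source B (go is only called on non-empty lists), "" keeps it total
def goB (colors : List (String × String)) (avatar_name : String) : List (String × String) → String
  | [] => ""
  | [pe] => nameB colors avatar_name pe.1 ++ " into " ++ nameB colors avatar_name pe.2
  | [pe, pe2] => (nameB colors avatar_name pe.1 ++ " into " ++ nameB colors avatar_name pe.2)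
      ++ " and " ++ goB colors avatar_name [pe2]
  | pe :: rest => (nameB colors avatar_name pe.1 ++ " into " ++ nameB colors avatar_name pe.2)
      ++ ", " ++ goB colors avatar_name rest

def format_transform_alt (transformed : List (String × String)) (colors : List (String × String)) (avatar_name : String) : String :=
  match transformed with
  | [] => "You can transform"
  | _ :: _ => "You can transform " ++ goB colors avatar_name transformed

-- ===== PRECONDITION & SPEC =====
-- Pre_ excludes exactly the inputs where A raises KeyError: a portal or exit name that is
-- neither the avatar nor a key of colors.
def Pre_format_transform (transformed : List (String × String)) (colors : List (String × String)) (avatar_name : String) : Prop :=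
  ∀ pe ∈ transformed,
    (pe.1 = avatar_name ∨ pe.1 ∈ colors.map Prod.fst) ∧ (pe.2 = avatar_name ∨ pe.2 ∈ colors.map Prod.fst)
instance (transformed : List (String × String)) (colors : List (String × String)) (avatar_name : String) : Decidable (Pre_format_transform transformed colors avatar_name) := by unfold Pre_format_transform; infer_instance

def pvWitness_format_transform : (List (String × String)) × (List (String × String)) × String :=
  ([("lava", "water"), ("me", "grass")], [("lava", "red"), ("water", "blue"), ("grass", "green")], "me")

def Spec_format_transform (transformed : List (String × String)) (colors : List (String × String)) (avatar_name : String) (out : String) : Prop := out = format_transform_alt transformed colors avatar_name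
instance (transformed : List (String × String)) (colors : List (String × String)) (avatar_name : String) (out : String) : Decidable (Spec_format_transform transformed colors avatar_name out) := by unfold Spec_format_transform; infer_instance

-- ===== CLAIM (what is proved, stated in full; the proofs are below) =====
def Claim_equal_format_transform : Prop := ∀ (transformed : List (String × String)) (colors : List (String × String)) (avatar_name : String), Dom_format_transform transformed colors avatar_name → Pre_format_transform transformed colors avatar_name → Spec_format_transform transformed colors avatar_name (format_transform transformed colors avatar_name)

-- ===== LEMMAS AND PROOFS =====

lemma yct : ("You can transform" : String) ++ " " = "You can transform " := by decide

lemma sobj : (" " : String) ++ "objects" = " objects" := by decide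

-- per-element: A's format_name_list on a singleton is B's name()
lemma fnlA_singleton (x : String) (colors : List (String × String)) (avatar_name : String) :
    fnlA [x] colors avatar_name "objects" "and" = nameB colors avatar_name x := by
  by_cases h : x = avatar_name
  · subst h
    simp [fnlA, nameB, PySem.List.remove?_cons_self]
  · have h' : ¬ avatar_name = x := fun hh => h hh.symm
    simp [fnlA, nameB, h, h', PySem.List.pyGet?, PySem.List.pyIdx?, String.append_assoc, sobj]

-- the fragment produced for one pair
def fragB (colors : List (String × String)) (avatar_name : String) (pe : String × String) : String :=
  nameB colors avatar_name pe.1 ++ " into " ++ nameB colors avatar_name pe.2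

-- the tail of A's sentence after the first fragment
def tailJoin : List String → String
  | [] => ""
  | [x] => " and " ++ x
  | x :: y :: t => ", " ++ x ++ tailJoin (y :: t)

lemma ftLoopA_tail (colors : List (String × String)) (avatar_name : String) :
    ∀ (pairs : List (String × String)) (n i : Nat) (s : String),
      pairs ≠ [] → 1 ≤ i → i + pairs.length = n →
      ftLoopA pairs colors avatar_name n i s = s ++ tailJoin (pairs.map (fragB colors avatar_name)) := by
  intro pairs
  induction pairs with
  | nil => intro n i s h; exact absurd rfl h
  | cons x rest ih =>
    intro n i s _ hi hn
    obtain ⟨p, e⟩ := x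
    match rest with
    | [] =>
        have hilast : i = n - 1 := by simp at hn; omega
        have hi0 : ¬ i = 0 := by omega
        rw [ftLoopA, if_neg hi0, if_pos hilast]
        simp [ftLoopA, tailJoin, fragB, fnlA_singleton, String.append_assoc]
    | y :: t =>
        have hi0 : ¬ i = 0 := by omega
        have hlast : ¬ i = n - 1 := by simp at hn; omega
        rw [ftLoopA, if_neg hi0, if_neg hlast]
        rw [ih n (i + 1) _ (by simp) (by omega) (by simp at hn ⊢; omega)]
        simp [tailJoin, fragB, fnlA_singleton, String.append_assoc]

-- B's recursion equals "head fragment ++ A-style tail"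
lemma goB_eq_tail (colors : List (String × String)) (avatar_name : String) :
    ∀ (x : String × String) (xs : List (String × String)),
      goB colors avatar_name (x :: xs)
        = fragB colors avatar_name x ++ tailJoin (xs.map (fragB colors avatar_name)) := by
  intro x xs
  induction xs generalizing x with
  | nil => simp [goB, fragB, tailJoin]  -- base
  | cons y t ih =>
    match t with
    | [] => simp [goB, fragB, tailJoin, String.append_assoc]
    | z :: u =>
        rw [show goB colors avatar_name (x :: y :: z :: u)
              = (nameB colors avatar_name x.1 ++ " into " ++ nameB colors avatar_name x.2)
                  ++ ", " ++ goB colors avatar_name (y :: z :: u) from rfl,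
            ih y]
        simp [tailJoin, fragB, String.append_assoc]

lemma zip_fst_snd (l : List (String × String)) :
    (l.map (fun tr => tr.1)).zip (l.map (fun tr => tr.2)) = l := by
  rw [List.zip_map']; simp

-- ===== VERDICT (by name: the statement is the Claim_ definition above) =====
theorem format_transform_spec : Claim_equal_format_transform := by
  intro transformed colors avatar_name _ _
  unfold Spec_format_transform format_transform format_transform_alt
  simp only [zip_fst_snd, List.length_map]
  match transformed with
  | [] => rfl
  | [(p, e)] =>
      rw [goB_eq_tail colors avatar_name (p, e) []]
      simp [ftLoopA, fragB, tailJoin, fnlA_singleton, yct, String.append_assoc]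
  | (p, e) :: (p2, e2) :: rest =>
      rw [ftLoopA, if_pos rfl]
      rw [ftLoopA_tail colors avatar_name _ _ 1 _ (by simp) le_rfl
            (by simp only [List.length_cons]; omega)]
      rw [goB_eq_tail colors avatar_name (p, e) ((p2, e2) :: rest)]
      simp only [fnlA_singleton, fragB, yct, String.append_assoc]
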